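-- pv_equiv track=rewrite | github.com/jdnewmil/aocpy | aocpy/aoc2023/day03.py | find_numbers_03a
-- ===== SOURCE A (Python) =====
-- def find_numbers_03a(mp: list[str]) -> set[tuple]:
--     """Find number positions tuples for all numbers in the map mp.
--
--     Parameters
--     ----------
--     mp : list[str]
--         List of strings representing rows in map
--
--     Returns
--     -------
--     set[tuple]
--         Set of number position tuples contining numbers in the map.
--     """
--     result = set()
--     for rowidx, row in enumerate(mp):
--         isdigit_last = False
--         for colidx, v in enumerate(row):
--             if v.isdigit():
--                 if not isdigit_last:
--                     leftidx = colidx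
--                 isdigit_last = True
--             elif isdigit_last:
--                 result.add((rowidx, leftidx, colidx))
--                 isdigit_last = False
--         if isdigit_last:
--             result.add((rowidx, leftidx, len(row)))
--     return result
-- ===== SOURCE B (Python) =====
-- def find_numbers_03a(mp: list[str]) -> set[tuple]:
--     """Two-pointer scan: jump over each maximal digit run instead of a flag state machine."""
--     result = set()
--     for rowidx, row in enumerate(mp):
--         n = len(row)
--         i = 0
--         while i < n:
--             if row[i].isdigit():
--                 j = i + 1
--                 while j < n and row[j].isdigit():
--                     j += 1
--                 result.add((rowidx, i, j))
--                 i = j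
--             else:
--                 i += 1
--     return result
-- ===== Notes on version B (the rewrite author's own statement) =====
-- stated objective: alternative
-- what changed: Replaced the isdigit_last flag state machine (with its separate end-of-row flush) by a two-pointer scan that, at each digit, advances a second pointer to the end of the maximal digit run and emits the span directly.
import Mathlib
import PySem

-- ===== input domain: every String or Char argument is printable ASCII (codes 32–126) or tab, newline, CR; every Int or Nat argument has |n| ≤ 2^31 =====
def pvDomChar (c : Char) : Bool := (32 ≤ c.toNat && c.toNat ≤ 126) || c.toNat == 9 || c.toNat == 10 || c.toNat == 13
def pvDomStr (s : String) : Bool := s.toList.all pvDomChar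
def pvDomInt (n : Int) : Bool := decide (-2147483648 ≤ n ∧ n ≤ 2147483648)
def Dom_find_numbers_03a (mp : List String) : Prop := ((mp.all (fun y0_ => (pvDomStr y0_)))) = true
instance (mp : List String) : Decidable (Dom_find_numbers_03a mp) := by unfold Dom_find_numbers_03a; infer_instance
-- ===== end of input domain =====

-- B replaces A's isdigit_last flag state machine by a two-pointer scan that jumps
-- over each maximal digit run (objective: alternative decomposition, same cost).

-- ===== PORT A =====
-- inner loop of A over one row: state (isdigit_last, leftidx), plus the end-of-row flush
def pvScanA (r : Int) (cs : List Char) (i : Int) (flag : Bool) (left : Int)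
    (acc : PySem.Set (Int × Int × Int)) : PySem.Set (Int × Int × Int) :=
  match cs with
  | [] => if flag then acc.add (r, left, i) else acc
  | c :: rest =>
    if PySem.Chars.isdigit c then
      pvScanA r rest (i + 1) true (if flag then left else i) acc
    else if flag then
      pvScanA r rest (i + 1) false left (acc.add (r, left, i))
    else
      pvScanA r rest (i + 1) false left acc

-- outer loop of A: for rowidx, row in enumerate(mp)
def pvRowsA (mp : List String) (r : Int)
    (acc : PySem.Set (Int × Int × Int)) : PySem.Set (Int × Int × Int) :=
  match mp with
  | [] => acc
  | row :: rest => pvRowsA rest (r + 1) (pvScanA r row.toList 0 false 0 acc)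

def find_numbers_03a (mp : List String) : List (Int × Int × Int) :=
  pvRowsA mp 0 PySem.Set.empty

-- ===== PORT B =====
-- B's inner while loop: length of the maximal digit run at the front
def pvRunLen : List Char → Nat
  | [] => 0
  | c :: rest => if PySem.Chars.isdigit c then pvRunLen rest + 1 else 0

-- B's outer while over one row: two pointers, jump i to the end j of each run
def pvScanB (r : Int) (cs : List Char) (i : Int)
    (acc : PySem.Set (Int × Int × Int)) : PySem.Set (Int × Int × Int) :=
  match cs with
  | [] => acc
  | c :: rest =>
    if PySem.Chars.isdigit c then
      pvScanB r (rest.drop (pvRunLen rest)) (i + pvRunLen rest + 1)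
        (acc.add (r, i, i + pvRunLen rest + 1))
    else
      pvScanB r rest (i + 1) acc
termination_by cs.length
decreasing_by all_goals simp

def pvRowsB (mp : List String) (r : Int)
    (acc : PySem.Set (Int × Int × Int)) : PySem.Set (Int × Int × Int) :=
  match mp with
  | [] => acc
  | row :: rest => pvRowsB rest (r + 1) (pvScanB r row.toList 0 acc)

def find_numbers_03a_alt (mp : List String) : List (Int × Int × Int) :=
  pvRowsB mp 0 PySem.Set.empty

-- ===== PRECONDITION & SPEC =====
def Spec_find_numbers_03a (mp : List String) (out : List (Int × Int × Int)) : Prop := out = find_numbers_03a_alt mp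
instance (mp : List String) (out : List (Int × Int × Int)) : Decidable (Spec_find_numbers_03a mp out) := by unfold Spec_find_numbers_03a; infer_instance

-- ===== CLAIM (what is proved, stated in full; the proofs are below) =====
def Claim_equal_find_numbers_03a : Prop := ∀ (mp : List String), Dom_find_numbers_03a mp → Spec_find_numbers_03a mp (find_numbers_03a mp)

-- ===== LEMMAS AND PROOFS =====

-- the pure list of spans of one row, in emission order (common normal form of both scans)
def pvSpans (r : Int) (cs : List Char) (i : Int) : List (Int × Int × Int) :=
  match cs with
  | [] => []
  | c :: rest =>
    if PySem.Chars.isdigit c then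
      (r, i, i + pvRunLen rest + 1) :: pvSpans r (rest.drop (pvRunLen rest)) (i + pvRunLen rest + 1)
    else
      pvSpans r rest (i + 1)
termination_by cs.length
decreasing_by all_goals simp

theorem pvScanB_eq (r : Int) (cs : List Char) (i : Int) (acc : PySem.Set (Int × Int × Int)) :
    pvScanB r cs i acc = (pvSpans r cs i).foldl PySem.Set.add acc := by
  fun_induction pvScanB r cs i acc with
  | case1 => simp [pvSpans]
  | case2 i acc c rest h ih => rw [pvSpans]; simp only [if_pos h, List.foldl]; exact ih
  | case3 i acc c rest h ih => rw [pvSpans]; simp only [if_neg h]; exact ih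

theorem pvScanA_eq (r : Int) (cs : List Char) : ∀ (i left : Int) (acc : PySem.Set (Int × Int × Int)),
    pvScanA r cs i false left acc = (pvSpans r cs i).foldl PySem.Set.add acc ∧
    pvScanA r cs i true left acc =
      ((r, left, i + (pvRunLen cs : Int)) ::
        pvSpans r (cs.drop (pvRunLen cs)) (i + (pvRunLen cs : Int))).foldl PySem.Set.add acc := by
  induction cs with
  | nil =>
      intro i left acc
      simp [pvScanA, pvSpans, pvRunLen]
  | cons c rest ih =>
      intro i left acc
      by_cases h : PySem.Chars.isdigit c
      · constructor
        · rw [pvScanA]; simp only [if_pos h]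
          rw [if_neg Bool.false_ne_true, (ih (i + 1) i acc).2, pvSpans]; simp only [if_pos h, List.foldl]
          have : i + 1 + (pvRunLen rest : Int) = i + (pvRunLen rest : Int) + 1 := by ring
          rw [this]
        · rw [pvScanA]; simp only [if_pos h]
          simp only [if_true]; rw [(ih (i + 1) left acc).2]
          have hk : pvRunLen (c :: rest) = pvRunLen rest + 1 := by simp [pvRunLen, h]
          rw [hk]
          have hd : (c :: rest).drop (pvRunLen rest + 1) = rest.drop (pvRunLen rest) := by
            simp [List.drop]
          rw [hd]
          have : i + 1 + (pvRunLen rest : Int) = i + ((pvRunLen rest + 1 : Nat) : Int) := by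
            push_cast; ring
          rw [this]
      · constructor
        · rw [pvScanA]; simp only [if_neg h]
          rw [(ih (i + 1) left acc).1, pvSpans]; simp [h]
        · rw [pvScanA]; simp only [if_neg h]; simp
          rw [(ih (i + 1) left (acc.add (r, left, i))).1]
          have hk : pvRunLen (c :: rest) = 0 := by simp [pvRunLen, h]
          rw [hk]
          simp only [Nat.cast_zero, add_zero, List.drop_zero, List.foldl]
          rw [pvSpans]; simp only [if_neg h]

theorem pvRows_eq (mp : List String) : ∀ (r : Int) (acc : PySem.Set (Int × Int × Int)),
    pvRowsA mp r acc = pvRowsB mp r acc := by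
  induction mp with
  | nil => intro r acc; rfl
  | cons row rest ih =>
      intro r acc
      rw [pvRowsA, pvRowsB, (pvScanA_eq r row.toList 0 0 acc).1, ← pvScanB_eq, ih]

-- ===== VERDICT (by name: the statement is the Claim_ definition above) =====
theorem find_numbers_03a_spec : Claim_equal_find_numbers_03a := by
  intro mp _
  unfold Spec_find_numbers_03a find_numbers_03a find_numbers_03a_alt
  exact pvRows_eq mp 0 PySem.Set.empty
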